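-- pv_equiv track=rewrite | github.com/toddstavish/squiggle | squiggle/squiggle.py | _k_mers
-- ===== SOURCE A (Python) =====
-- from itertools import islice
--
-- def _k_mers(sequence, k):
--     it = iter(sequence)
--     result = tuple(islice(it, k))
--     if len(result) == k:
--         yield "".join(result)
--     for elem in it:
--         result = result[1:] + (elem,)
--         yield "".join(result)
-- ===== SOURCE B (Python) =====
-- def _k_mers(sequence, k):
--     seq = tuple(sequence)
--     for i in range(len(seq) - k + 1):
--         yield "".join(seq[i:i + k])
-- ===== Notes on version B (the rewrite author's own statement) =====
-- stated objective: idiomatic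
-- what changed: B materializes the sequence once and yields each k-mer by random-access slicing over range(len-k+1), instead of A's streaming decomposition that maintains and shifts a sliding window tuple.
-- intended difference: For k = 0 on a non-empty sequence A returns '' followed by every single element (leftover loop state: the empty window absorbs each element), while B returns len+1 empty strings, the correct list of all length-0 windows. — e.g. on _k_mers("a", 0): A returns ["", "a"], B returns ["", ""]
import Mathlib
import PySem

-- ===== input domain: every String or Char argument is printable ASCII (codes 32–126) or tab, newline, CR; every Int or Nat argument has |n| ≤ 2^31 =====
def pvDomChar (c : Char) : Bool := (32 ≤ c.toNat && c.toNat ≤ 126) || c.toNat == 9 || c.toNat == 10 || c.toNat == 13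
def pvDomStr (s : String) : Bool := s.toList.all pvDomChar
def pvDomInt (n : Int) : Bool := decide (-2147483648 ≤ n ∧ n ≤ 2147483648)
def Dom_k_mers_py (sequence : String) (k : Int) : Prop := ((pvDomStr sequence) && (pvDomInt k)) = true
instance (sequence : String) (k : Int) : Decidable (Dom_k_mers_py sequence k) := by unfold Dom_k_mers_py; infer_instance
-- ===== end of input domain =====

-- B replaces A's shifting sliding-window stream with index-driven slicing; equivalence is
-- proved for k ≥ 1 (and k = 0 on ""), with the intended difference at k = 0 on non-empty input stated as D_.

-- ===== PORT A =====
-- 'for elem in it: result = result[1:] + (elem,); yield "".join(result)'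
def kmersLoopA (result : List Char) (rest : List Char) : List String :=
  match rest with
  | [] => []
  | elem :: it =>
    let result' := result.drop 1 ++ [elem]
    String.mk result' :: kmersLoopA result' it

def k_mers_py (sequence : String) (k : Int) : List String :=
  let it := sequence.toList
  let result := it.take k.toNat        -- tuple(islice(it, k)); k ≥ 0 on Pre_
  let rest := it.drop k.toNat          -- what remains of the iterator
  (if (result.length : Int) = k then [String.mk result] else []) ++ kmersLoopA result rest

-- ===== PORT B =====
def k_mers_py_alt (sequence : String) (k : Int) : List String :=
  (PySem.List.pyRange 0 ((sequence.toList.length : Int) - k + 1) 1).map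
    (fun i => String.mk (PySem.List.slice sequence.toList (some i) (some (i + k))))

-- ===== PRECONDITION & SPEC =====
-- Pre_ excludes k < 0, where A raises ValueError (islice rejects negative counts).
def Pre_k_mers_py (sequence : String) (k : Int) : Prop := 0 ≤ k
instance (sequence : String) (k : Int) : Decidable (Pre_k_mers_py sequence k) := by unfold Pre_k_mers_py; infer_instance
def pvWitness_k_mers_py : String × Int := ("abc", 2)

-- For k = 0 on a non-empty sequence A returns '' followed by every single element (leftover loop
-- state: the empty window absorbs each element), while B returns len+1 empty strings, the correct
-- list of all length-0 windows.
def D_k_mers_py (sequence : String) (k : Int) : Prop := k = 0 ∧ sequence ≠ ""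
instance (sequence : String) (k : Int) : Decidable (D_k_mers_py sequence k) := by unfold D_k_mers_py; infer_instance

def Spec_k_mers_py (sequence : String) (k : Int) (out : List String) : Prop :=
  ¬ D_k_mers_py sequence k → out = k_mers_py_alt sequence k
instance (sequence : String) (k : Int) (out : List String) : Decidable (Spec_k_mers_py sequence k out) := by unfold Spec_k_mers_py; infer_instance

def pvDiffWitness_k_mers_py : String × Int := ("a", 0)
def pvDiffWitnessOut_k_mers_py : (List String) × (List String) := (["", "a"], ["", ""])

-- ===== CLAIM =====
def Claim_unchanged_k_mers_py : Prop := ∀ (sequence : String) (k : Int), Dom_k_mers_py sequence k → Pre_k_mers_py sequence k → Spec_k_mers_py sequence k (k_mers_py sequence k)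
def Claim_changed_k_mers_py : Prop := Dom_k_mers_py (pvDiffWitness_k_mers_py.1) (pvDiffWitness_k_mers_py.2) ∧ Pre_k_mers_py (pvDiffWitness_k_mers_py.1) (pvDiffWitness_k_mers_py.2) ∧ D_k_mers_py (pvDiffWitness_k_mers_py.1) (pvDiffWitness_k_mers_py.2) ∧ k_mers_py (pvDiffWitness_k_mers_py.1) (pvDiffWitness_k_mers_py.2) = pvDiffWitnessOut_k_mers_py.1 ∧ k_mers_py_alt (pvDiffWitness_k_mers_py.1) (pvDiffWitness_k_mers_py.2) = pvDiffWitnessOut_k_mers_py.2 ∧ pvDiffWitnessOut_k_mers_py.1 ≠ pvDiffWitnessOut_k_mers_py.2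
def Claim_exact_k_mers_py : Prop := ∀ (sequence : String) (k : Int), Dom_k_mers_py sequence k → Pre_k_mers_py sequence k → D_k_mers_py sequence k → k_mers_py sequence k ≠ k_mers_py_alt sequence k

-- ===== LEMMAS AND PROOFS =====

-- window shift: dropping the head of a full window and appending the next element is the next window
lemma window_shift (cs : List Char) (n j : Nat) (hn : 1 ≤ n) (h : j + n < cs.length) :
    ((cs.drop j).take n).drop 1 ++ [cs[j + n]] = (cs.drop (j + 1)).take n := by
  have h1 : ((cs.drop j).take n).drop 1 = (cs.drop (j + 1)).take (n - 1) := by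
    rw [List.drop_take, List.drop_drop]
  have h2 : (cs.drop (j + 1))[n - 1]? = some cs[j + n] := by
    rw [List.getElem?_drop]
    have he : j + 1 + (n - 1) = j + n := by omega
    rw [he]
    exact List.getElem?_eq_getElem h
  rw [h1]
  have h3 := List.take_add_one (l := cs.drop (j + 1)) (i := n - 1)
  rw [h2] at h3
  simp only [Option.toList_some] at h3
  rw [← h3]
  congr 1
  omega

-- the sliding loop of A produces exactly the indexed windows of B's pass
lemma loopA_windows (n : Nat) (hn : 1 ≤ n) (cs : List Char) :
    ∀ (m j : Nat), cs.length = j + n + m →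
    kmersLoopA ((cs.drop j).take n) (cs.drop (j + n)) =
      (List.range m).map (fun i => String.mk ((cs.drop (j + 1 + i)).take n)) := by
  intro m
  induction m with
  | zero =>
    intro j hlen
    have hz : cs.drop (j + n) = [] := List.drop_of_length_le (by omega)
    rw [hz]
    simp [kmersLoopA]
  | succ m ih =>
    intro j hlen
    have hjn : j + n < cs.length := by omega
    rw [List.drop_eq_getElem_cons hjn]
    simp only [kmersLoopA]
    rw [window_shift cs n j hn hjn]
    have hd : cs.drop (j + n + 1) = cs.drop ((j + 1) + n) := by congr 1; omega
    rw [hd, ih (j + 1) (by omega)]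
    rw [List.range_succ_eq_map, List.map_cons, List.map_map]
    refine List.cons_eq_cons.mpr ⟨by norm_num, List.map_congr_left fun i _ => ?_⟩
    have he : j + 1 + 1 + i = j + 1 + (i + 1) := by omega
    simp [he]

-- A for k = 0: the empty window absorbs each element, yielding '' then every single element
lemma loopA_zero (cs : List Char) (w : List Char) (hw : w.length ≤ 1) :
    kmersLoopA w cs = cs.map (fun c => String.mk [c]) := by
  induction cs generalizing w with
  | nil => simp [kmersLoopA]
  | cons e es ih =>
    simp only [kmersLoopA, List.map_cons]
    have hdrop : w.drop 1 = [] := by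
      apply List.eq_nil_of_length_eq_zero
      simp
      omega
    rw [hdrop]
    simp
    exact ih [e] (by simp)

-- B in drop/take form, for 0 ≤ k
lemma alt_eq (sequence : String) (k : Int) (hk : 0 ≤ k) :
    k_mers_py_alt sequence k =
      (List.range ((sequence.toList.length : Int) - k + 1).toNat).map
        (fun j => String.mk ((sequence.toList.drop j).take k.toNat)) := by
  unfold k_mers_py_alt
  rw [PySem.List.pyRange_one]
  simp only [sub_zero, List.map_map]
  apply List.map_congr_left
  intro j _
  simp only [Function.comp, zero_add]
  have : ((j : Int)) + k = ((j : Int)) + ((k.toNat : Int)) := by omega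
  rw [this, PySem.List.slice_natCast_add]

theorem k_mers_py_spec : Claim_unchanged_k_mers_py := by
  intro sequence k _ hk hnd
  have hk' : (0 : Int) ≤ k := hk
  rcases Int.lt_or_le 0 k with hpos | hz
  · -- k ≥ 1
    set cs := sequence.toList with hcs
    set n := k.toNat with hn
    have hn1 : 1 ≤ n := by omega
    have hkn : (n : Int) = k := by omega
    rcases Nat.lt_or_ge cs.length n with hlt | hge
    · -- k > len: both empty
      unfold k_mers_py
      rw [alt_eq sequence k (by omega)]
      simp only [← hcs, ← hn]
      have hres : cs.take n = cs := List.take_of_length_le (by omega)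
      have hrest : cs.drop n = [] := List.drop_of_length_le (by omega)
      rw [hres, hrest]
      have hiff : ¬ ((cs.length : Int) = k) := by omega
      rw [if_neg hiff]
      have : ((cs.length : Int) - k + 1).toNat = 0 := by omega
      rw [this]
      simp [kmersLoopA]
    · -- k ≤ len: windows
      unfold k_mers_py
      rw [alt_eq sequence k (by omega)]
      simp only [← hcs, ← hn]
      have hlen : (cs.take n).length = n := by simp; omega
      have hiff : ((cs.take n).length : Int) = k := by rw [hlen]; omega
      rw [if_pos hiff]
      have hmain := loopA_windows n hn1 cs (cs.length - n) 0 (by omega)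
      simp only [List.drop_zero, zero_add] at hmain
      rw [hmain]
      have : ((cs.length : Int) - k + 1).toNat = (cs.length - n) + 1 := by omega
      rw [this, List.range_succ_eq_map, List.map_cons, List.map_map]
      refine List.cons_eq_cons.mpr ⟨by simp, List.map_congr_left fun i _ => ?_⟩
      have he : 1 + i = i + 1 := by omega
      simp [he]
  · -- k = 0, and ¬D forces sequence = ""
    have hk0 : k = 0 := by omega
    subst hk0
    have hseq : sequence = "" := by
      by_contra h
      exact hnd ⟨rfl, h⟩
    subst hseq
    decide

theorem k_mers_py_changed : Claim_changed_k_mers_py := by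
  unfold Claim_changed_k_mers_py; decide

theorem k_mers_py_tight : Claim_exact_k_mers_py := by
  intro sequence k _ _ hd heq
  obtain ⟨hk0, hne⟩ := hd
  subst hk0
  set cs := sequence.toList with hcs
  have hcne : cs ≠ [] := by
    intro h
    exact hne (String.toList_eq_nil_iff.mp h)
  obtain ⟨e, es, hes⟩ := List.exists_cons_of_ne_nil hcne
  -- A's element at index 1 is the first character, B's is ""
  have hA : k_mers_py sequence 0 = "" :: cs.map (fun c => String.mk [c]) := by
    unfold k_mers_py
    simp only [← hcs, Int.toNat_zero, List.take_zero, List.drop_zero]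
    rw [if_pos (by simp), loopA_zero cs [] (by simp)]
    rfl
  have hB : k_mers_py_alt sequence 0 =
      (List.range (cs.length + 1)).map (fun _ => String.mk []) := by
    rw [alt_eq sequence 0 (by omega)]
    have hx : ((sequence.toList.length : Int) - 0 + 1).toNat = sequence.toList.length + 1 := by omega
    rw [hx]
    simp [← hcs]
  rw [hA, hB] at heq
  have h1 := congrArg (fun l => l[1]?) heq
  simp only [hes] at h1
  simp at h1
  first
    | exact h1
    | simpa using String.ofList_eq_empty_iff.mp h1
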